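-- pv_equiv track=rewrite | github.com/pypi-data/pypi-mirror-398 | packages/privalyse-cli/privalyse_cli-0.3.3.tar.gz/privalyse_cli-0.3.3/privalyse_scanner/analyzers/javascript_analyzer.py | infer_pii_type
-- ===== SOURCE A (Python) =====
-- from typing import List, Dict, Any, Optional, Tuple
--
-- def infer_pii_type(var_name: str) -> List[str]:
--     """Infer PII type from variable name."""
--     var_lower = var_name.lower()
--     pii_types = []
--
--     # False Positive Reduction: Exclude config/service/handler objects
--     if any(x in var_lower for x in ['config', 'service', 'handler', 'manager', 'factory', 'provider', 'module', 'controller', 'rules', 'context', 'schema']):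
--         return []
--
--     if any(k in var_lower for k in ['email', 'e_mail', 'mail']):
--         pii_types.append('email')
--     if any(k in var_lower for k in ['password', 'passwd', 'pwd', 'secret', 'token', 'key', 'auth', 'credential', 'session_id', 'jwt', 'access_token', 'refresh_token', 'bearer']):
--         pii_types.append('password')
--     if any(k in var_lower for k in ['first_name', 'last_name', 'fullname', 'firstname', 'lastname', 'surname', 'family_name', 'display_name']):
--         pii_types.append('name')
--     if any(k in var_lower for k in ['user_id', 'customer_id', 'uuid', 'account_id', 'member_id']):
--         pii_types.append('id')
--     if any(k in var_lower for k in ['phone', 'mobile', 'tel', 'cell', 'fax']):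
--         pii_types.append('phone')
--     if any(k in var_lower for k in ['address', 'city', 'country', 'zip', 'postal', 'street', 'state', 'province', 'geo', 'lat', 'lon']):
--         pii_types.append('location')
--     if any(k in var_lower for k in ['creditcard', 'credit_card', 'card_number', 'cc_number', 'cvv', 'iban', 'bank_account', 'routing_number', 'bic', 'swift']):
--         pii_types.append('financial')
--     if any(k in var_lower for k in ['ssn', 'social_security', 'tax_id', 'passport', 'driver_license', 'id_card', 'national_id']):
--         pii_types.append('id')
--     if any(k in var_lower for k in ['birth', 'dob', 'date_of_birth', 'birthday', 'age']):
--         pii_types.append('birth_date')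
--
--     return pii_types
-- ===== SOURCE B (Python) =====
-- # Inverted-index re-implementation: instead of scanning every keyword against the
-- # string, enumerate the substrings of the (lowercased) name up to the maximum
-- # keyword length and look each one up in a hash map keyword -> group number
-- # (group 0 = the exclude list, groups 1..9 = the PII rules, in A's order);
-- # finally emit the labels of the fired groups in group order.
--
-- _GROUPS = [
--     (0, None, ['config', 'service', 'handler', 'manager', 'factory', 'provider',
--                'module', 'controller', 'rules', 'context', 'schema']),
--     (1, 'email', ['email', 'e_mail', 'mail']),
--     (2, 'password', ['password', 'passwd', 'pwd', 'secret', 'token', 'key', 'auth',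
--                      'credential', 'session_id', 'jwt', 'access_token',
--                      'refresh_token', 'bearer']),
--     (3, 'name', ['first_name', 'last_name', 'fullname', 'firstname', 'lastname',
--                  'surname', 'family_name', 'display_name']),
--     (4, 'id', ['user_id', 'customer_id', 'uuid', 'account_id', 'member_id']),
--     (5, 'phone', ['phone', 'mobile', 'tel', 'cell', 'fax']),
--     (6, 'location', ['address', 'city', 'country', 'zip', 'postal', 'street',
--                      'state', 'province', 'geo', 'lat', 'lon']),
--     (7, 'financial', ['creditcard', 'credit_card', 'card_number', 'cc_number', 'cvv',
--                       'iban', 'bank_account', 'routing_number', 'bic', 'swift']),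
--     (8, 'id', ['ssn', 'social_security', 'tax_id', 'passport', 'driver_license',
--                'id_card', 'national_id']),
--     (9, 'birth_date', ['birth', 'dob', 'date_of_birth', 'birthday', 'age']),
-- ]
--
-- # keyword -> group number (all 78 keywords are distinct)
-- _INDEX = {k: g for g, _lab, kws in _GROUPS for k in kws}
-- _MAXLEN = 15  # longest keyword ('social_security')
-- _LABELS = [(g, lab) for g, lab, _kws in _GROUPS if lab is not None]
--
--
-- def infer_pii_type(var_name: str) -> list:
--     """Infer PII type from variable name (inverted substring index)."""
--     v = var_name.lower()
--     fired = set()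
--     for i in range(len(v)):
--         for j in range(i + 1, i + _MAXLEN + 1):
--             g = _INDEX.get(v[i:j])
--             if g is not None:
--                 fired.add(g)
--     if 0 in fired:
--         return []
--     return [lab for g, lab in _LABELS if g in fired]
-- ===== Notes on version B (the rewrite author's own statement) =====
-- stated objective: alternative
-- what changed: Replaces A's chain of per-keyword substring scans (any(k in v) per branch) by an inverted index: B enumerates the substrings of the lowercased name up to the longest keyword's length, looks each up in a hash map keyword -> group number, collects fired groups in a set, and emits the labels of the fired groups (group 0 = the exclude list) in group order.
import Mathlib
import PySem

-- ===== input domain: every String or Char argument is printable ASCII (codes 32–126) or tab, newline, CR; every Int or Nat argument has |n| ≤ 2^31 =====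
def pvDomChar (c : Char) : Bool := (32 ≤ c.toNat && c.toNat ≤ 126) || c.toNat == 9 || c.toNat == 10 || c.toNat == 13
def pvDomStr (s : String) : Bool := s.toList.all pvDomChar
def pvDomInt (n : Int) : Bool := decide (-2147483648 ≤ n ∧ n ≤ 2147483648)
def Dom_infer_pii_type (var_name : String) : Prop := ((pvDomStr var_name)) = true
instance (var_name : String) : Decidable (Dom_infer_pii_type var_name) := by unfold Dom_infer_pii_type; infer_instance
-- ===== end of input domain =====

-- B replaces A's per-keyword substring scans by an inverted index: it enumerates the
-- substrings of the lowercased name (up to the longest keyword) and looks each up in a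
-- keyword -> group map, then emits the labels of the fired groups; objective: alternative.

-- ===== PORT A =====
def infer_pii_type (var_name : String) : List String :=
  let var_lower := PySem.Str.lower var_name
  let pii_types : List String := []
  if ["config", "service", "handler", "manager", "factory", "provider", "module", "controller", "rules", "context", "schema"].any (fun x => PySem.Str.isIn x var_lower) then
    []
  else
    let pii_types := if ["email", "e_mail", "mail"].any (fun k => PySem.Str.isIn k var_lower) then pii_types ++ ["email"] else pii_types
    let pii_types := if ["password", "passwd", "pwd", "secret", "token", "key", "auth", "credential", "session_id", "jwt", "access_token", "refresh_token", "bearer"].any (fun k => PySem.Str.isIn k var_lower) then pii_types ++ ["password"] else pii_types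
    let pii_types := if ["first_name", "last_name", "fullname", "firstname", "lastname", "surname", "family_name", "display_name"].any (fun k => PySem.Str.isIn k var_lower) then pii_types ++ ["name"] else pii_types
    let pii_types := if ["user_id", "customer_id", "uuid", "account_id", "member_id"].any (fun k => PySem.Str.isIn k var_lower) then pii_types ++ ["id"] else pii_types
    let pii_types := if ["phone", "mobile", "tel", "cell", "fax"].any (fun k => PySem.Str.isIn k var_lower) then pii_types ++ ["phone"] else pii_types
    let pii_types := if ["address", "city", "country", "zip", "postal", "street", "state", "province", "geo", "lat", "lon"].any (fun k => PySem.Str.isIn k var_lower) then pii_types ++ ["location"] else pii_types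
    let pii_types := if ["creditcard", "credit_card", "card_number", "cc_number", "cvv", "iban", "bank_account", "routing_number", "bic", "swift"].any (fun k => PySem.Str.isIn k var_lower) then pii_types ++ ["financial"] else pii_types
    let pii_types := if ["ssn", "social_security", "tax_id", "passport", "driver_license", "id_card", "national_id"].any (fun k => PySem.Str.isIn k var_lower) then pii_types ++ ["id"] else pii_types
    let pii_types := if ["birth", "dob", "date_of_birth", "birthday", "age"].any (fun k => PySem.Str.isIn k var_lower) then pii_types ++ ["birth_date"] else pii_types
    pii_types

-- ===== PORT B =====
-- group number, optional label (none = exclude group), keywords — Source B's _GROUPS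
def pvGroups : List (Nat × Option String × List String) :=
  [ (0, none, ["config", "service", "handler", "manager", "factory", "provider", "module", "controller", "rules", "context", "schema"]),
    (1, some "email", ["email", "e_mail", "mail"]),
    (2, some "password", ["password", "passwd", "pwd", "secret", "token", "key", "auth", "credential", "session_id", "jwt", "access_token", "refresh_token", "bearer"]),
    (3, some "name", ["first_name", "last_name", "fullname", "firstname", "lastname", "surname", "family_name", "display_name"]),
    (4, some "id", ["user_id", "customer_id", "uuid", "account_id", "member_id"]),
    (5, some "phone", ["phone", "mobile", "tel", "cell", "fax"]),
    (6, some "location", ["address", "city", "country", "zip", "postal", "street", "state", "province", "geo", "lat", "lon"]),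
    (7, some "financial", ["creditcard", "credit_card", "card_number", "cc_number", "cvv", "iban", "bank_account", "routing_number", "bic", "swift"]),
    (8, some "id", ["ssn", "social_security", "tax_id", "passport", "driver_license", "id_card", "national_id"]),
    (9, some "birth_date", ["birth", "dob", "date_of_birth", "birthday", "age"]) ]

-- Source B's _INDEX = {k: g ...}; keywords as char lists (the string side is bridged via .toList)
def pvKwPairs : List (List Char × Nat) :=
  pvGroups.flatMap (fun t => t.2.2.map (fun k => (k.toList, t.1)))

def pvIndex : PySem.Dict (List Char) Nat := PySem.Dict.ofList pvKwPairs

-- Source B's _LABELS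
def pvLabels : List (Nat × String) :=
  pvGroups.filterMap (fun t => match t.2.1 with | some lab => some (t.1, lab) | none => none)

-- the double loop filling the 'fired' set (Source B's loop body; 15 = _MAXLEN)
def pvFired (v : List Char) : PySem.Set Nat :=
  (PySem.List.pyRange 0 (v.length : Int) 1).foldl (fun fired i =>
    (PySem.List.pyRange (i + 1) (i + 15 + 1) 1).foldl (fun fired j =>
      match pvIndex.get? (PySem.List.slice v (some i) (some j)) with
      | some g => fired.add g
      | none => fired) fired) PySem.Set.empty

def infer_pii_type_alt (var_name : String) : List String :=
  let v := PySem.Chars.lower var_name.toList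
  let fired := pvFired v
  if fired.contains 0 then []
  else pvLabels.filterMap (fun p => if fired.contains p.1 then some p.2 else none)

-- ===== PRECONDITION & SPEC =====
def Spec_infer_pii_type (var_name : String) (out : List String) : Prop := out = infer_pii_type_alt var_name
instance (var_name : String) (out : List String) : Decidable (Spec_infer_pii_type var_name out) := by unfold Spec_infer_pii_type; infer_instance

-- ===== CLAIM (what is proved, stated in full; the proofs are below) =====
def Claim_equal_infer_pii_type : Prop := ∀ (var_name : String), Dom_infer_pii_type var_name → Spec_infer_pii_type var_name (infer_pii_type var_name)

-- ===== LEMMAS AND PROOFS =====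

def pvKwsOf (g : Nat) : List (List Char) :=
  (pvKwPairs.filter (fun p => p.2 == g)).map Prod.fst

theorem pv_mem_foldl {α : Type} (B : PySem.Set Nat → α → PySem.Set Nat) (P : α → Prop) (x : Nat)
    (h : ∀ s a, (x ∈ B s a ↔ x ∈ s ∨ P a)) :
    ∀ (l : List α) (s : PySem.Set Nat), x ∈ l.foldl B s ↔ x ∈ s ∨ ∃ a ∈ l, P a := by
  intro l
  induction l with
  | nil => intro s; simp
  | cons a t ih => intro s; simp only [List.foldl_cons, ih, h, List.mem_cons]; aesop

set_option maxRecDepth 100000 in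
theorem pv_mem_fired (v : List Char) (x : Nat) :
    x ∈ pvFired v ↔ ∃ i ∈ PySem.List.pyRange 0 (v.length : Int) 1,
      ∃ j ∈ PySem.List.pyRange (i + 1) (i + 15 + 1) 1,
        pvIndex.get? (PySem.List.slice v (some i) (some j)) = some x := by
  have hmatch : ∀ (s : PySem.Set Nat) (o : Option Nat),
      x ∈ (match o with | some g => s.add g | none => s) ↔ x ∈ s ∨ o = some x := by
    intro s o
    cases o with
    | none => simp
    | some g => simp [PySem.Set.mem_add, eq_comm]
  have hin : ∀ (i : Int) (s : PySem.Set Nat),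
      x ∈ (PySem.List.pyRange (i + 1) (i + 15 + 1) 1).foldl
        (fun fired j => match pvIndex.get? (PySem.List.slice v (some i) (some j)) with
          | some g => fired.add g | none => fired) s
      ↔ x ∈ s ∨ ∃ j ∈ PySem.List.pyRange (i + 1) (i + 15 + 1) 1,
          pvIndex.get? (PySem.List.slice v (some i) (some j)) = some x :=
    fun i s => pv_mem_foldl
      (fun fired j => match pvIndex.get? (PySem.List.slice v (some i) (some j)) with
          | some g => fired.add g | none => fired)
      (fun j => pvIndex.get? (PySem.List.slice v (some i) (some j)) = some x) x
      (fun s j => hmatch s (pvIndex.get? (PySem.List.slice v (some i) (some j)))) _ s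
  unfold pvFired
  rw [pv_mem_foldl _ (fun i => ∃ j ∈ PySem.List.pyRange (i + 1) (i + 15 + 1) 1,
        pvIndex.get? (PySem.List.slice v (some i) (some j)) = some x) x (fun s i => hin i s)]
  simp [PySem.Set.empty]

set_option maxRecDepth 100000 in
theorem pv_items : pvIndex.items = pvKwPairs := by decide

set_option maxRecDepth 100000 in
theorem pv_keysNodup : pvIndex.keys.Nodup := by decide

theorem pv_get? (cs : List Char) (g : Nat) : pvIndex.get? cs = some g ↔ cs ∈ pvKwsOf g := by
  rw [PySem.Dict.get?_eq_some_iff_mem_items pvIndex cs g pv_keysNodup, pv_items, pvKwsOf]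
  simp only [List.mem_map, List.mem_filter]
  constructor
  · intro h; exact ⟨(cs, g), ⟨h, by simp⟩, rfl⟩
  · rintro ⟨p, ⟨hm, hg⟩, hfst⟩
    have hp : p = (cs, g) := by
      obtain ⟨p1, p2⟩ := p
      simp_all
    rwa [hp] at hm

theorem pv_kw_bounds : ∀ p ∈ pvKwPairs, p.1 ≠ [] ∧ p.1.length ≤ 15 := by decide

theorem pv_kwsOf_bounds (g : Nat) (k : List Char) (hk : k ∈ pvKwsOf g) : k ≠ [] ∧ k.length ≤ 15 := by
  unfold pvKwsOf at hk
  simp only [List.mem_map, List.mem_filter] at hk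
  obtain ⟨p, ⟨hp, _⟩, rfl⟩ := hk
  exact pv_kw_bounds p hp

theorem pv_slice_iff (v k : List Char) (h1 : k ≠ []) (h2 : k.length ≤ 15) :
    (∃ i ∈ PySem.List.pyRange 0 (v.length : Int) 1,
      ∃ j ∈ PySem.List.pyRange (i + 1) (i + 15 + 1) 1,
        PySem.List.slice v (some i) (some j) = k) ↔ PySem.Chars.isIn k v = true := by
  rw [← PySem.Chars.exists_prefix_drop_iff_isIn]
  constructor
  · rintro ⟨i, hi, j, hj, hs⟩
    rw [PySem.List.mem_pyRange_one] at hi hj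
    rw [PySem.List.slice_toNat v (by omega) (by omega)] at hs
    exact ⟨i.toNat, hs ▸ List.take_prefix _ _⟩
  · rintro ⟨d, hd⟩
    have hkp : 0 < k.length := List.length_pos_iff.mpr h1
    have hdlt : d < v.length := by
      by_contra hcon
      have hnil : v.drop d = [] := List.drop_eq_nil_of_le (by omega)
      rw [hnil] at hd
      exact h1 (List.prefix_nil.mp hd)
    refine ⟨(d : Int), ?_, (d : Int) + (k.length : Int), ?_, ?_⟩
    · rw [PySem.List.mem_pyRange_one]; omega
    · rw [PySem.List.mem_pyRange_one]; omega
    · rw [PySem.List.slice_toNat v (by omega) (by omega)]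
      have e1 : ((d : Int) + (k.length : Int)) = ((d + k.length : Nat) : Int) := by push_cast; ring
      rw [e1, Int.toNat_natCast, Int.toNat_natCast]
      have e2 : d + k.length - d = k.length := by omega
      rw [e2]
      exact (List.prefix_iff_eq_take.mp hd).symm

theorem pv_contains (v : List Char) (g : Nat) :
    (pvFired v).contains g = (pvKwsOf g).any (fun k => PySem.Chars.isIn k v) := by
  rw [Bool.eq_iff_iff, PySem.Set.contains_iff, pv_mem_fired, List.any_eq_true]
  constructor
  · rintro ⟨i, hi, j, hj, hg⟩
    rw [pv_get?] at hg
    have hb := pv_kwsOf_bounds g _ hg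
    refine ⟨_, hg, ?_⟩
    rw [← pv_slice_iff v _ hb.1 hb.2]
    exact ⟨i, hi, j, hj, rfl⟩
  · rintro ⟨k, hk, hin⟩
    have hb := pv_kwsOf_bounds g k hk
    obtain ⟨i, hi, j, hj, hs⟩ := (pv_slice_iff v k hb.1 hb.2).mpr hin
    refine ⟨i, hi, j, hj, ?_⟩
    rw [pv_get?, hs]
    exact hk

-- A's branch chain with its ten Bool conditions abstracted; checked over all 2^10 valuations.
theorem pvChain (e c1 c2 c3 c4 c5 c6 c7 c8 c9 : Bool) :
    (if e then ([] : List String) else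
      let p : List String := []
      let p := if c1 then p ++ ["email"] else p
      let p := if c2 then p ++ ["password"] else p
      let p := if c3 then p ++ ["name"] else p
      let p := if c4 then p ++ ["id"] else p
      let p := if c5 then p ++ ["phone"] else p
      let p := if c6 then p ++ ["location"] else p
      let p := if c7 then p ++ ["financial"] else p
      let p := if c8 then p ++ ["id"] else p
      let p := if c9 then p ++ ["birth_date"] else p
      p) =
    (if e then [] else
      List.filterMap (fun r : Bool × String => if r.1 then some r.2 else none)
        [(c1, "email"), (c2, "password"), (c3, "name"), (c4, "id"), (c5, "phone"),
         (c6, "location"), (c7, "financial"), (c8, "id"), (c9, "birth_date")]) := by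
  revert e c1 c2 c3 c4 c5 c6 c7 c8 c9
  decide

-- B's if/filterMap with the fired-set queries abstracted (definitional)
theorem pvAltShape (F : Nat → Bool) :
    (if F 0 then ([] : List String)
     else pvLabels.filterMap (fun p => if F p.1 then some p.2 else none)) =
    (if F 0 then []
     else List.filterMap (fun r : Bool × String => if r.1 then some r.2 else none)
       [(F 1, "email"), (F 2, "password"), (F 3, "name"), (F 4, "id"), (F 5, "phone"),
        (F 6, "location"), (F 7, "financial"), (F 8, "id"), (F 9, "birth_date")]) := rfl

-- B's result written with A's Bool conditions
theorem pvAltNF (var_name : String) :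
    infer_pii_type_alt var_name = (if ["config", "service", "handler", "manager", "factory", "provider", "module", "controller", "rules", "context", "schema"].any (fun k => PySem.Str.isIn k (PySem.Str.lower var_name)) then ([] : List String)
     else List.filterMap (fun r : Bool × String => if r.1 then some r.2 else none)
       [ (["email", "e_mail", "mail"].any (fun k => PySem.Str.isIn k (PySem.Str.lower var_name)), "email"),
         (["password", "passwd", "pwd", "secret", "token", "key", "auth", "credential", "session_id", "jwt", "access_token", "refresh_token", "bearer"].any (fun k => PySem.Str.isIn k (PySem.Str.lower var_name)), "password"),
         (["first_name", "last_name", "fullname", "firstname", "lastname", "surname", "family_name", "display_name"].any (fun k => PySem.Str.isIn k (PySem.Str.lower var_name)), "name"),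
         (["user_id", "customer_id", "uuid", "account_id", "member_id"].any (fun k => PySem.Str.isIn k (PySem.Str.lower var_name)), "id"),
         (["phone", "mobile", "tel", "cell", "fax"].any (fun k => PySem.Str.isIn k (PySem.Str.lower var_name)), "phone"),
         (["address", "city", "country", "zip", "postal", "street", "state", "province", "geo", "lat", "lon"].any (fun k => PySem.Str.isIn k (PySem.Str.lower var_name)), "location"),
         (["creditcard", "credit_card", "card_number", "cc_number", "cvv", "iban", "bank_account", "routing_number", "bic", "swift"].any (fun k => PySem.Str.isIn k (PySem.Str.lower var_name)), "financial"),
         (["ssn", "social_security", "tax_id", "passport", "driver_license", "id_card", "national_id"].any (fun k => PySem.Str.isIn k (PySem.Str.lower var_name)), "id"),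
         (["birth", "dob", "date_of_birth", "birthday", "age"].any (fun k => PySem.Str.isIn k (PySem.Str.lower var_name)), "birth_date") ]) := by
  have hc : ∀ (g : Nat) (ks : List String), pvKwsOf g = ks.map String.toList →
      (pvFired (PySem.Chars.lower var_name.toList)).contains g
        = ks.any (fun k => PySem.Str.isIn k (PySem.Str.lower var_name)) := by
    intro g ks hks
    rw [pv_contains, hks, List.any_map]
    simp [Function.comp_def, PySem.Str.isIn_eq, PySem.Str.toList_lower]
  have h2 : (if (pvFired (PySem.Chars.lower var_name.toList)).contains 0 then ([] : List String)
     else List.filterMap (fun r : Bool × String => if r.1 then some r.2 else none)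
       [ ((pvFired (PySem.Chars.lower var_name.toList)).contains 1, "email"),
         ((pvFired (PySem.Chars.lower var_name.toList)).contains 2, "password"),
         ((pvFired (PySem.Chars.lower var_name.toList)).contains 3, "name"),
         ((pvFired (PySem.Chars.lower var_name.toList)).contains 4, "id"),
         ((pvFired (PySem.Chars.lower var_name.toList)).contains 5, "phone"),
         ((pvFired (PySem.Chars.lower var_name.toList)).contains 6, "location"),
         ((pvFired (PySem.Chars.lower var_name.toList)).contains 7, "financial"),
         ((pvFired (PySem.Chars.lower var_name.toList)).contains 8, "id"),
         ((pvFired (PySem.Chars.lower var_name.toList)).contains 9, "birth_date") ]) = (if ["config", "service", "handler", "manager", "factory", "provider", "module", "controller", "rules", "context", "schema"].any (fun k => PySem.Str.isIn k (PySem.Str.lower var_name)) then ([] : List String)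
     else List.filterMap (fun r : Bool × String => if r.1 then some r.2 else none)
       [ (["email", "e_mail", "mail"].any (fun k => PySem.Str.isIn k (PySem.Str.lower var_name)), "email"),
         (["password", "passwd", "pwd", "secret", "token", "key", "auth", "credential", "session_id", "jwt", "access_token", "refresh_token", "bearer"].any (fun k => PySem.Str.isIn k (PySem.Str.lower var_name)), "password"),
         (["first_name", "last_name", "fullname", "firstname", "lastname", "surname", "family_name", "display_name"].any (fun k => PySem.Str.isIn k (PySem.Str.lower var_name)), "name"),
         (["user_id", "customer_id", "uuid", "account_id", "member_id"].any (fun k => PySem.Str.isIn k (PySem.Str.lower var_name)), "id"),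
         (["phone", "mobile", "tel", "cell", "fax"].any (fun k => PySem.Str.isIn k (PySem.Str.lower var_name)), "phone"),
         (["address", "city", "country", "zip", "postal", "street", "state", "province", "geo", "lat", "lon"].any (fun k => PySem.Str.isIn k (PySem.Str.lower var_name)), "location"),
         (["creditcard", "credit_card", "card_number", "cc_number", "cvv", "iban", "bank_account", "routing_number", "bic", "swift"].any (fun k => PySem.Str.isIn k (PySem.Str.lower var_name)), "financial"),
         (["ssn", "social_security", "tax_id", "passport", "driver_license", "id_card", "national_id"].any (fun k => PySem.Str.isIn k (PySem.Str.lower var_name)), "id"),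
         (["birth", "dob", "date_of_birth", "birthday", "age"].any (fun k => PySem.Str.isIn k (PySem.Str.lower var_name)), "birth_date") ]) := by
      rw [hc 0 ["config", "service", "handler", "manager", "factory", "provider", "module", "controller", "rules", "context", "schema"] rfl]
      rw [hc 1 ["email", "e_mail", "mail"] rfl]
      rw [hc 2 ["password", "passwd", "pwd", "secret", "token", "key", "auth", "credential", "session_id", "jwt", "access_token", "refresh_token", "bearer"] rfl]
      rw [hc 3 ["first_name", "last_name", "fullname", "firstname", "lastname", "surname", "family_name", "display_name"] rfl]
      rw [hc 4 ["user_id", "customer_id", "uuid", "account_id", "member_id"] rfl]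
      rw [hc 5 ["phone", "mobile", "tel", "cell", "fax"] rfl]
      rw [hc 6 ["address", "city", "country", "zip", "postal", "street", "state", "province", "geo", "lat", "lon"] rfl]
      rw [hc 7 ["creditcard", "credit_card", "card_number", "cc_number", "cvv", "iban", "bank_account", "routing_number", "bic", "swift"] rfl]
      rw [hc 8 ["ssn", "social_security", "tax_id", "passport", "driver_license", "id_card", "national_id"] rfl]
      rw [hc 9 ["birth", "dob", "date_of_birth", "birthday", "age"] rfl]
  exact (pvAltShape (fun g => (pvFired (PySem.Chars.lower var_name.toList)).contains g)).trans h2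

-- ===== VERDICT (by name: the statement is the Claim_ definition above) =====
theorem infer_pii_type_spec : Claim_equal_infer_pii_type := by
  intro var_name _
  show infer_pii_type var_name = infer_pii_type_alt var_name
  exact (pvChain _ _ _ _ _ _ _ _ _ _).trans (pvAltNF var_name).symm
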